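-- pv_equiv track=rewrite | github.com/casbahlab/cq-storyrag | composite_rag_pipeline/generator/generator_dual.py | _trim_to_budget
-- ===== SOURCE A (Python) =====
-- from typing import Any, Dict, List, Optional, Tuple
-- from typing import List, Dict, Tuple, Union
--
-- def _trim_to_budget(lines: List[str], budget: int) -> List[str]:
--     out = []; sofar = 0
--     for ln in lines:
--         ln = ln.strip()
--         if not ln: continue
--         n = len(ln) + 1
--         if sofar + n > budget: break
--         out.append(ln); sofar += n
--     return out
-- ===== SOURCE B (Python) =====
-- def _trim_to_budget(lines, budget):
--     # Stage 1: filter stripped non-empty lines.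
--     kept = [s for s in map(str.strip, lines) if s]
--     # Stage 2: prefix sums of costs (len+1), pref[k] = cost of keeping first k lines.
--     pref = [0]
--     total = 0
--     for s in kept:
--         total += len(s) + 1
--         pref.append(total)
--     # Stage 3: binary search the largest k with pref[k] <= budget
--     # (valid because pref is nondecreasing, so the predicate is downward closed).
--     lo, hi = 0, len(kept)
--     while lo < hi:
--         mid = (lo + hi + 1) // 2
--         if pref[mid] <= budget:
--             lo = mid
--         else:
--             hi = mid - 1
--     return kept[:lo]
-- ===== Notes on version B (the rewrite author's own statement) =====
-- stated objective: alternative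
-- what changed: Replaces A's single accumulating loop with break by three stages: filter the stripped non-empty lines, build a prefix-sum table of costs (len+1), and locate the cutoff index by binary search over the monotone prefix sums, then slice.
import Mathlib
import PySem

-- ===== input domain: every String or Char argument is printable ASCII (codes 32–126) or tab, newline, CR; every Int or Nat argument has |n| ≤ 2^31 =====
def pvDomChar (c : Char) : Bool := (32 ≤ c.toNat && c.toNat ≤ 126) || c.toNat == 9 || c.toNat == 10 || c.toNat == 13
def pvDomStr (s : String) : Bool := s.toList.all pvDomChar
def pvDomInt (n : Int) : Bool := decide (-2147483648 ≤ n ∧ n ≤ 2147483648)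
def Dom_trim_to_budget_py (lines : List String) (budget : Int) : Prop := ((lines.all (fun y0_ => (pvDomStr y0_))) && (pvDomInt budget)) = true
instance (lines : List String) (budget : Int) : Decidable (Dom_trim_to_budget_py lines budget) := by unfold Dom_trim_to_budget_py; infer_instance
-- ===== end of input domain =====

-- B replaces A's accumulating scan-with-break by filtering, a prefix-sum table and a
-- BINARY SEARCH for the cutoff index (objective: alternative; same overall O(n) cost).

-- ===== PORT A =====
-- the for-loop with `continue`/`break`, carrying the accumulator `sofar`
def trimA (budget : Int) : List String → Int → List String
  | [], _ => []
  | ln :: rest, sofar =>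
    let ln := PySem.Str.strip ln
    if ln = "" then trimA budget rest sofar
    else
      let n : Int := PySem.Str.len ln + 1
      if sofar + n > budget then []
      else ln :: trimA budget rest (sofar + n)

def trim_to_budget_py (lines : List String) (budget : Int) : List String :=
  trimA budget lines 0

-- ===== PORT B =====
-- stage 2: the running totals appended after the initial 0 (the loop's `total` variable)
def prefAux : List String → Int → List Int
  | [], _ => []
  | s :: rest, total =>
    let t := total + PySem.Str.len s + 1
    t :: prefAux rest t

-- stage 3: the while-loop binary search; lo/hi are nonnegative list indices throughout, so
-- Nat with Nat-division matches Python's `//`, and `pref[mid]` is always in range (getD's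
-- default 0 is never used).
def bsearchTrim (pref : List Int) (budget : Int) (lo hi : Nat) : Nat :=
  if lo < hi then
    let mid := (lo + hi + 1) / 2
    if pref.getD mid 0 ≤ budget then bsearchTrim pref budget mid hi
    else bsearchTrim pref budget lo (mid - 1)
  else lo
termination_by hi - lo
decreasing_by all_goals omega

def trim_to_budget_py_alt (lines : List String) (budget : Int) : List String :=
  let kept := (lines.map PySem.Str.strip).filter (fun s => s ≠ "")
  let pref := 0 :: prefAux kept 0
  let k := bsearchTrim pref budget 0 kept.length
  kept.take k

-- ===== PRECONDITION & SPEC =====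
def Spec_trim_to_budget_py (lines : List String) (budget : Int) (out : List String) : Prop := out = trim_to_budget_py_alt lines budget
instance (lines : List String) (budget : Int) (out : List String) : Decidable (Spec_trim_to_budget_py lines budget out) := by unfold Spec_trim_to_budget_py; infer_instance

-- ===== CLAIM (what is proved, stated in full; the proofs are below) =====
def Claim_equal_trim_to_budget_py : Prop := ∀ (lines : List String) (budget : Int), Dom_trim_to_budget_py lines budget → Spec_trim_to_budget_py lines budget (trim_to_budget_py lines budget)

-- ===== LEMMAS AND PROOFS =====

theorem prefAux_length (kept : List String) : ∀ t, (prefAux kept t).length = kept.length := by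
  induction kept with
  | nil => intro t; simp [prefAux]
  | cons s rest ih => intro t; simp [prefAux, ih]

theorem prefAux_gt (kept : List String) : ∀ t x, x ∈ prefAux kept t → t < x := by
  induction kept with
  | nil => intro t x hx; simp [prefAux] at hx
  | cons s rest ih =>
    intro t x hx
    simp only [prefAux, List.mem_cons] at hx
    have hlen : (0:Int) ≤ PySem.Str.len s := by
      simp [PySem.Str.len_eq]
    rcases hx with rfl | hx
    · omega
    · have := ih _ _ hx; omega

theorem prefAux_mono (kept : List String) : ∀ t i j, i ≤ j → j < (prefAux kept t).length →
    (prefAux kept t).getD i 0 ≤ (prefAux kept t).getD j 0 := by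
  induction kept with
  | nil => intro t i j _ hj; simp [prefAux] at hj
  | cons s rest ih =>
    intro t i j hij hj
    simp only [prefAux, List.length_cons] at hj ⊢
    match i, j with
    | 0, 0 => simp
    | 0, j + 1 =>
      simp only [List.getD_cons_zero, List.getD_cons_succ]
      have hjlt : j < (prefAux rest (t + PySem.Str.len s + 1)).length := by omega
      have hmem : (prefAux rest (t + PySem.Str.len s + 1)).getD j 0 ∈ prefAux rest (t + PySem.Str.len s + 1) := by
        rw [List.getD_eq_getElem _ _ hjlt]; exact List.getElem_mem hjlt
      have := prefAux_gt rest _ _ hmem; omega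
    | i + 1, j + 1 =>
      simp only [List.getD_cons_succ]
      exact ih _ i j (by omega) (by omega)

theorem tw_le {α : Type} (p : α → Bool) (P : List α) : (P.takeWhile p).length ≤ P.length := by
  induction P with
  | nil => simp
  | cons a P ih =>
    by_cases hp : p a
    · simp only [List.takeWhile_cons, hp, if_pos, List.length_cons]; omega
    · simp [hp]

theorem tw_lt {α : Type} (p : α → Bool) (d : α) (P : List α) :
    ∀ i, i < (P.takeWhile p).length → p (P.getD i d) = true := by
  induction P with
  | nil => intro i hi; simp at hi
  | cons a P ih =>
    intro i hi
    by_cases hp : p a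
    · simp only [List.takeWhile_cons, hp, if_pos, List.length_cons] at hi
      match i with
      | 0 => simpa using hp
      | i + 1 => simpa using ih i (by simpa using (by omega : i < (P.takeWhile p).length))
    · simp [hp] at hi

theorem tw_stop {α : Type} (p : α → Bool) (d : α) (P : List α) :
    (P.takeWhile p).length < P.length → p (P.getD (P.takeWhile p).length d) = false := by
  induction P with
  | nil => intro h; simp at h
  | cons a P ih =>
    intro h
    by_cases hp : p a
    · simp only [List.takeWhile_cons, hp, if_pos, List.length_cons] at h ⊢
      simpa using ih (by omega)
    · simp [hp]

-- A's loop computes `take K` of the filtered list, K the takeWhile-length of the running sums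
theorem trimA_char (budget : Int) (lines : List String) : ∀ sofar,
    trimA budget lines sofar =
      (((lines.map PySem.Str.strip).filter (fun s => s ≠ "")).take
        (((prefAux ((lines.map PySem.Str.strip).filter (fun s => s ≠ "")) sofar).takeWhile
          (fun t => t ≤ budget)).length)) := by
  induction lines with
  | nil => intro sofar; simp [trimA]
  | cons ln rest ih =>
    intro sofar
    simp only [List.map_cons, List.filter_cons]
    by_cases h : PySem.Str.strip ln = ""
    · have hL : trimA budget (ln :: rest) sofar = trimA budget rest sofar := by
        simp [trimA, h]
      rw [hL, if_neg (by simpa using h)]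
      exact ih sofar
    · rw [if_pos (by simpa using h)]
      by_cases hb : budget < sofar + (PySem.Str.len (PySem.Str.strip ln) + 1)
      · have hL : trimA budget (ln :: rest) sofar = [] := by
          simp only [trimA]
          rw [if_neg h, if_pos (by omega)]
        rw [hL]
        simp only [prefAux, List.takeWhile_cons]
        rw [if_neg (by simp only [decide_eq_true_eq]; omega)]
        simp
      · have hL : trimA budget (ln :: rest) sofar =
            PySem.Str.strip ln :: trimA budget rest (sofar + (PySem.Str.len (PySem.Str.strip ln) + 1)) := by
          simp only [trimA]
          rw [if_neg h, if_neg (by omega)]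
        have hassoc : sofar + (PySem.Str.len (PySem.Str.strip ln) + 1) =
            sofar + PySem.Str.len (PySem.Str.strip ln) + 1 := by ring
        rw [hL, ih, hassoc]
        simp only [prefAux, List.takeWhile_cons]
        rw [if_pos (by simp only [decide_eq_true_eq]; omega)]
        simp [List.take_succ_cons]

theorem bsearch_correct (kept : List String) (budget : Int) :
    ∀ d lo hi, hi - lo ≤ d →
      lo ≤ ((prefAux kept 0).takeWhile (fun t => t ≤ budget)).length →
      ((prefAux kept 0).takeWhile (fun t => t ≤ budget)).length ≤ hi →
      hi ≤ kept.length →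
      bsearchTrim (0 :: prefAux kept 0) budget lo hi =
        ((prefAux kept 0).takeWhile (fun t => t ≤ budget)).length := by
  intro d
  induction d with
  | zero =>
    intro lo hi hd hlo hhi _
    rw [bsearchTrim, if_neg (by omega)]
    omega
  | succ d ih =>
    intro lo hi hd hlo hhi hn
    by_cases hlt : lo < hi
    · rw [bsearchTrim, if_pos hlt]
      have hPlen : (prefAux kept 0).length = kept.length := prefAux_length kept 0
      have hmid1 : lo < (lo + hi + 1) / 2 ∧ (lo + hi + 1) / 2 ≤ hi := by
        constructor <;> omega
      obtain ⟨m', hm'⟩ : ∃ m', (lo + hi + 1) / 2 = m' + 1 := ⟨(lo + hi + 1) / 2 - 1, by omega⟩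
      simp only [hm', List.getD_cons_succ]
      by_cases hcond : (prefAux kept 0).getD m' 0 ≤ budget
      · have hmK : m' + 1 ≤ ((prefAux kept 0).takeWhile (fun t => t ≤ budget)).length := by
          by_contra hcon
          have hKlt : ((prefAux kept 0).takeWhile (fun t => t ≤ budget)).length <
              (prefAux kept 0).length := by omega
          have hstop := tw_stop (fun t : Int => t ≤ budget) 0 (prefAux kept 0) hKlt
          have hmono := prefAux_mono kept 0
            ((prefAux kept 0).takeWhile (fun t => t ≤ budget)).length m' (by omega) (by omega)
          simp only [decide_eq_false_iff_not, not_le] at hstop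
          omega
        rw [if_pos hcond, ← hm']
        exact ih ((lo + hi + 1) / 2) hi (by omega) (by omega) hhi hn
      · have hKm : ((prefAux kept 0).takeWhile (fun t => t ≤ budget)).length ≤ m' := by
          by_contra hcon
          have := tw_lt (fun t : Int => t ≤ budget) 0 (prefAux kept 0) m' (by omega)
          simp only [decide_eq_true_eq] at this
          omega
        rw [if_neg hcond, ← hm']
        exact ih lo ((lo + hi + 1) / 2 - 1) (by omega) hlo (by omega) (by omega)
    · rw [bsearchTrim, if_neg hlt]
      omega

-- ===== VERDICT (by name: the statement is the Claim_ definition above) =====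
theorem trim_to_budget_py_spec : Claim_equal_trim_to_budget_py := by
  intro lines budget _
  unfold Spec_trim_to_budget_py trim_to_budget_py trim_to_budget_py_alt
  have hK : (((prefAux ((lines.map PySem.Str.strip).filter (fun s => s ≠ "")) 0).takeWhile
        (fun t => t ≤ budget)).length) ≤
      ((lines.map PySem.Str.strip).filter (fun s => s ≠ "")).length := by
    calc _ ≤ (prefAux ((lines.map PySem.Str.strip).filter (fun s => s ≠ "")) 0).length :=
          tw_le _ _
      _ = _ := prefAux_length _ 0
  show trimA budget lines 0 = _
  rw [trimA_char budget lines 0]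
  exact congrArg (fun k => List.take k ((lines.map PySem.Str.strip).filter (fun s => s ≠ ""))) (bsearch_correct ((lines.map PySem.Str.strip).filter (fun s => s ≠ "")) budget
    ((lines.map PySem.Str.strip).filter (fun s => s ≠ "")).length 0
    ((lines.map PySem.Str.strip).filter (fun s => s ≠ "")).length (by omega) (by omega) hK le_rfl).symm
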